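-- pv_equiv track=rewrite | github.com/ucfnlp/summarization-sing-pair-mix | importance_features.py | get_sent_indices
-- ===== SOURCE A (Python) =====
-- def get_sent_indices(enc_sentences, doc_indices):
--     cur_doc_idx = 0
--     cur_sent_idx = 1
--     count = 0
--     sent_indices = []
--     for sent_idx, sent in enumerate(enc_sentences):
--         if cur_doc_idx != doc_indices[count]:
--             cur_doc_idx = doc_indices[count]
--             cur_sent_idx = 1
--         sent_indices.append(cur_sent_idx)
--         for word_idx, word in enumerate(sent):
--             count += 1
--         cur_sent_idx += 1
--     return sent_indices
-- ===== SOURCE B (Python) =====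
-- def get_sent_indices(enc_sentences, doc_indices):
--     # table of starting word offsets per sentence
--     offs = []
--     total = 0
--     for sent in enc_sentences:
--         offs.append(total)
--         total += len(sent)
--     # doc id of each sentence, read at the same cumulative offsets A reads
--     sent_docs = [doc_indices[o] for o in offs]
--     # number each maximal run of consecutive equal doc ids 1..k
--     out = []
--     while sent_docs:
--         d = sent_docs[0]
--         k = 1
--         while k < len(sent_docs) and sent_docs[k] == d:
--             k += 1
--         out.extend(range(1, k + 1))
--         sent_docs = sent_docs[k:]
--     return out
-- ===== Notes on version B (the rewrite author's own statement) =====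
-- stated objective: alternative
-- what changed: Replaces A's single running-counter-with-reset loop (which counts words one by one in an inner loop) by a three-stage decomposition: build the table of cumulative word offsets via len(), map it to per-sentence doc ids, then run-length group consecutive equal doc ids and emit 1..k per run via range().
import Mathlib
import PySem

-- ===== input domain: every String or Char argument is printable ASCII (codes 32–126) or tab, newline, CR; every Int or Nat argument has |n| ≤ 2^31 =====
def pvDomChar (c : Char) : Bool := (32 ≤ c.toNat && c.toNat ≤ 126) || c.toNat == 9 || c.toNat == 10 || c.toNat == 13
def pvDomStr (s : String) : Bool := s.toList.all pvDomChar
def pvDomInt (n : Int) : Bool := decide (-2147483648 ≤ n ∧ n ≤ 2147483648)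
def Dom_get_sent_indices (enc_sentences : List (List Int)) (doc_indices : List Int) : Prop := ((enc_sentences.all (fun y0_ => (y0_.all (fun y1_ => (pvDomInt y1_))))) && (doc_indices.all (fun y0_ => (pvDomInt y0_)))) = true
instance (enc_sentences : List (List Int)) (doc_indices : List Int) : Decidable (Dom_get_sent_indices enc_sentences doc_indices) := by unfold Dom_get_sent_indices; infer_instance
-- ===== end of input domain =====

-- B replaces A's running-counter-with-reset loop by an offset table, a doc-id table, and
-- run-length grouping of consecutive equal doc ids (objective: alternative decomposition; A counts
-- words one by one in an inner loop, B uses len() per sentence).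

-- ===== PORT A =====
-- loop body of A's for-loop, named for reuse in the proofs (a literal transliteration)
def pvAStep (doc_indices : List Int) (s : Int × Int × Int × List Int) (sent : List Int) :
    Int × Int × Int × List Int :=
  let cur_doc := s.1
  let cur_sent := s.2.1
  let count := s.2.2.1
  let sent_indices := s.2.2.2
  let d := PySem.List.pyGetD doc_indices count 0
  let p := if cur_doc ≠ d then (d, (1 : Int)) else (cur_doc, cur_sent)
  let cur_doc' := p.1
  let cur_sent' := p.2
  let sent_indices' := sent_indices ++ [cur_sent']
  let count' := sent.foldl (fun c _ => c + 1) count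
  (cur_doc', cur_sent' + 1, count', sent_indices')

def get_sent_indices (enc_sentences : List (List Int)) (doc_indices : List Int) : List Int :=
  (enc_sentences.foldl (pvAStep doc_indices) (0, 1, 0, [])).2.2.2

-- ===== PORT B =====
-- inner while loop: count the run of doc ids equal to the head, emit 1..k, continue after the run
def pvEmitRuns : List Int → List Int
  | [] => []
  | d :: rest =>
    let k : Int := (rest.takeWhile (fun x => x == d)).length + 1
    PySem.List.pyRange 1 (k + 1) 1 ++ pvEmitRuns (rest.dropWhile (fun x => x == d))
termination_by sds => sds.length
decreasing_by
  have := List.length_dropWhile_le (fun x => x == d) rest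
  simp; omega

def get_sent_indices_alt (enc_sentences : List (List Int)) (doc_indices : List Int) : List Int :=
  let st := enc_sentences.foldl
    (fun (p : List Int × Int) sent => (p.1 ++ [p.2], p.2 + sent.length)) ([], 0)
  let offs := st.1
  let sent_docs := offs.map (fun o => PySem.List.pyGetD doc_indices o 0)
  pvEmitRuns sent_docs

-- ===== PRECONDITION & SPEC =====
-- Pre_ excludes exactly the inputs on which A raises IndexError: some sentence's starting
-- cumulative word offset is ≥ len(doc_indices).
def Pre_get_sent_indices (enc_sentences : List (List Int)) (doc_indices : List Int) : Prop :=
  ∀ i, i < enc_sentences.length →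
    ((enc_sentences.take i).map List.length).sum < doc_indices.length
instance (enc_sentences : List (List Int)) (doc_indices : List Int) : Decidable (Pre_get_sent_indices enc_sentences doc_indices) := by unfold Pre_get_sent_indices; infer_instance

def pvWitness_get_sent_indices : List (List Int) × List Int := ([[7, 8], [9]], [0, 0, 1])

def Spec_get_sent_indices (enc_sentences : List (List Int)) (doc_indices : List Int) (out : List Int) : Prop := out = get_sent_indices_alt enc_sentences doc_indices
instance (enc_sentences : List (List Int)) (doc_indices : List Int) (out : List Int) : Decidable (Spec_get_sent_indices enc_sentences doc_indices out) := by unfold Spec_get_sent_indices; infer_instance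

-- ===== CLAIM (what is proved, stated in full; the proofs are below) =====
def Claim_equal_get_sent_indices : Prop := ∀ (enc_sentences : List (List Int)) (doc_indices : List Int), Dom_get_sent_indices enc_sentences doc_indices → Pre_get_sent_indices enc_sentences doc_indices → Spec_get_sent_indices enc_sentences doc_indices (get_sent_indices enc_sentences doc_indices)

-- ===== LEMMAS AND PROOFS =====

-- common reference: the per-sentence doc ids read at cumulative offsets starting from c
def pvSentDocs (doc : List Int) : List (List Int) → Int → List Int
  | [], _ => []
  | s :: rest, c => PySem.List.pyGetD doc c 0 :: pvSentDocs doc rest (c + s.length)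

-- common reference: A's numbering of a doc-id sequence
def pvNumbering (cd cs : Int) : List Int → List Int
  | [] => []
  | d :: rest => if cd ≠ d then 1 :: pvNumbering d 2 rest else cs :: pvNumbering cd (cs + 1) rest

theorem pv_count_foldl (s : List Int) (c : Int) :
    s.foldl (fun c _ => c + 1) c = c + s.length := by
  induction s generalizing c with
  | nil => simp
  | cons x xs ih => simp [List.foldl, ih]; ring

theorem pvA_loop (doc : List Int) (enc : List (List Int)) (cd cs c : Int) (acc : List Int) :
    (enc.foldl (pvAStep doc) (cd, cs, c, acc)).2.2.2
      = acc ++ pvNumbering cd cs (pvSentDocs doc enc c) := by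
  induction enc generalizing cd cs c acc with
  | nil => simp [pvSentDocs, pvNumbering]
  | cons s rest ih =>
    rw [List.foldl_cons]
    by_cases h : cd ≠ PySem.List.pyGetD doc c 0
    · have hstep : pvAStep doc (cd, cs, c, acc) s
          = (PySem.List.pyGetD doc c 0, 2, c + s.length, acc ++ [1]) := by
        simp [pvAStep, if_pos h, pv_count_foldl]
      rw [hstep, ih]
      simp [pvSentDocs, pvNumbering, h]
    · have h : cd = PySem.List.pyGetD doc c 0 := not_not.mp h
      have hstep : pvAStep doc (cd, cs, c, acc) s
          = (cd, cs + 1, c + s.length, acc ++ [cs]) := by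
        simp [pvAStep, h, pv_count_foldl]
      rw [hstep, ih]
      simp [pvSentDocs, pvNumbering, h]

-- B's offset fold, characterised
def pvOffs : List (List Int) → Int → List Int
  | [], _ => []
  | s :: rest, t => t :: pvOffs rest (t + s.length)

theorem pvB_offs (enc : List (List Int)) (acc : List Int) (t : Int) :
    (enc.foldl (fun (p : List Int × Int) sent => (p.1 ++ [p.2], p.2 + sent.length)) (acc, t)).1
      = acc ++ pvOffs enc t := by
  induction enc generalizing acc t with
  | nil => simp [pvOffs]
  | cons s rest ih => simp [List.foldl, ih, pvOffs]

theorem pvB_sentdocs (doc : List Int) (enc : List (List Int)) (t : Int) :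
    (pvOffs enc t).map (fun o => PySem.List.pyGetD doc o 0) = pvSentDocs doc enc t := by
  induction enc generalizing t with
  | nil => simp [pvOffs, pvSentDocs]
  | cons s rest ih => simp [pvOffs, pvSentDocs, ih]

-- a run of copies of d starting a numbering at m emits m, m+1, …, m+len-1
theorem pv_run (d : Int) (run rest' : List Int) (m : Int)
    (hrun : ∀ x ∈ run, x = d) :
    pvNumbering d m (run ++ rest')
      = PySem.List.pyRange m (m + run.length) 1 ++ pvNumbering d (m + run.length) rest' := by
  induction run generalizing m with
  | nil =>
    have h0 : PySem.List.pyRange m m 1 = [] := PySem.List.pyRange_one_eq_nil (le_refl m)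
    simp [h0]
  | cons x xs ih =>
    have hx : x = d := hrun x (by simp)
    have hxs : ∀ y ∈ xs, y = d := fun y hy => hrun y (by simp [hy])
    have hlt : m < m + ((x :: xs).length : Int) := by simp
    rw [PySem.List.pyRange_one_cons hlt]
    simp only [List.cons_append, pvNumbering, hx, ite_not, if_true]
    rw [ih (m + 1) hxs]
    have h1 : m + 1 + (xs.length : Int) = m + ((x :: xs).length : Int) := by
      simp only [List.length_cons]; push_cast; ring
    rw [h1]
    simp

-- after a run, facing a different head (or the end), numbering restarts like from 1
theorem pv_restart (d m : Int) (rest' : List Int)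
    (h : ∀ e ∈ rest'.head?, e ≠ d) :
    pvNumbering d m rest' = pvNumbering d 1 rest' := by
  cases rest' with
  | nil => rfl
  | cons e r =>
    have he : e ≠ d := h e (by simp)
    have hde : ¬ d = e := fun h' => he h'.symm
    simp [pvNumbering, hde]

theorem pv_numbering_eq_emit (sds : List Int) (cd : Int) :
    pvNumbering cd 1 sds = pvEmitRuns sds := by
  match sds with
  | [] => simp [pvNumbering, pvEmitRuns]
  | d :: rest =>
    have hd1 : pvNumbering cd 1 (d :: rest) = 1 :: pvNumbering d 2 rest := by
      by_cases h : cd ≠ d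
      · simp [pvNumbering, h]
      · have h : cd = d := not_not.mp h
        subst h; simp [pvNumbering]
    rw [hd1]
    have hsplit : rest = rest.takeWhile (fun x => x == d) ++ rest.dropWhile (fun x => x == d) :=
      (List.takeWhile_append_dropWhile).symm
    have hrun : ∀ x ∈ rest.takeWhile (fun x => x == d), x = d := by
      intro x hx
      have := List.mem_takeWhile_imp hx
      simpa using this
    have hhead : ∀ e ∈ (rest.dropWhile (fun x => x == d)).head?, e ≠ d := by
      intro e he
      have h2 := List.head?_dropWhile_not (p := fun x => x == d) (l := rest)
      cases hh : (rest.dropWhile (fun x => x == d)).head? with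
      | none => simp [hh] at he
      | some e' =>
        rw [hh] at he; simp at he; subst he
        rw [hh] at h2; simpa using h2
    conv_lhs => rw [hsplit]
    rw [pv_run d _ _ 2 hrun, pv_restart d _ _ hhead,
        pv_numbering_eq_emit (rest.dropWhile (fun x => x == d)) d]
    rw [pvEmitRuns]
    have hlt : (1 : Int) < ((rest.takeWhile (fun x => x == d)).length : Int) + 1 + 1 := by
      have : (0:Int) ≤ ((rest.takeWhile (fun x => x == d)).length : Int) := Int.natCast_nonneg _
      omega
    rw [PySem.List.pyRange_one_cons hlt]
    have h2 : ((rest.takeWhile (fun x => x == d)).length : Int) + 1 + 1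
        = 2 + (rest.takeWhile (fun x => x == d)).length := by ring
    rw [h2]
    simp
termination_by sds.length
decreasing_by
  have := List.length_dropWhile_le (fun x => x == d) rest
  simp
  omega

-- ===== VERDICT (by name: the statement is the Claim_ definition above) =====
theorem pvB_eq (enc : List (List Int)) (doc : List Int) :
    get_sent_indices_alt enc doc = pvEmitRuns (pvSentDocs doc enc 0) := by
  show pvEmitRuns
      (((enc.foldl (fun (p : List Int × Int) sent => (p.1 ++ [p.2], p.2 + sent.length))
          ([], 0)).1).map (fun o => PySem.List.pyGetD doc o 0)) = _
  rw [pvB_offs]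
  simp [pvB_sentdocs]

theorem get_sent_indices_spec : Claim_equal_get_sent_indices := by
  intro enc doc _ _
  unfold Spec_get_sent_indices get_sent_indices
  rw [pvA_loop, pvB_eq]
  simp only [List.nil_append]
  exact pv_numbering_eq_emit (pvSentDocs doc enc 0) 0
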